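-- pv_equiv track=rewrite | github.com/WhyDoWeLiveWithoutMeaning/AdventOfCode | y21/Day4/P1/Main.py | bingoWin
-- ===== SOURCE A (Python) =====
-- def bingoWin(bingoCard, called):
--     # Check Rows
--     for i in range(len(bingoCard)):
--         nums = 0
--         for j in range(len(bingoCard)):
--             if bingoCard[i][j] in called:
--                 nums += 1
--         if nums >= 5:
--             return True
--
--     # Check Cols
--     for i in range(len(bingoCard)):
--         nums = 0
--         for j in range(len(bingoCard)):
--             if bingoCard[j][i] in called:
--                 nums += 1
--         if nums >= 5:
--             return True
--     return False
-- ===== SOURCE B (Python) =====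
-- def bingoWin(bingoCard, called):
--     n = len(bingoCard)
--     calledSet = set(called)
--     rowCount = [0] * n
--     colCount = [0] * n
--     for i in range(n):
--         for j in range(n):
--             if bingoCard[i][j] in calledSet:
--                 rowCount[i] += 1
--                 colCount[j] += 1
--     return any(c >= 5 for c in rowCount) or any(c >= 5 for c in colCount)
-- ===== Notes on version B (the rewrite author's own statement) =====
-- stated objective: faster
-- what changed: Replaces A's two separate quadratic passes (each doing a linear membership scan of `called` per cell) with one single pass over the card that accumulates per-row and per-column hit counts in two arrays, using a set for O(1) membership.
import Mathlib
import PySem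

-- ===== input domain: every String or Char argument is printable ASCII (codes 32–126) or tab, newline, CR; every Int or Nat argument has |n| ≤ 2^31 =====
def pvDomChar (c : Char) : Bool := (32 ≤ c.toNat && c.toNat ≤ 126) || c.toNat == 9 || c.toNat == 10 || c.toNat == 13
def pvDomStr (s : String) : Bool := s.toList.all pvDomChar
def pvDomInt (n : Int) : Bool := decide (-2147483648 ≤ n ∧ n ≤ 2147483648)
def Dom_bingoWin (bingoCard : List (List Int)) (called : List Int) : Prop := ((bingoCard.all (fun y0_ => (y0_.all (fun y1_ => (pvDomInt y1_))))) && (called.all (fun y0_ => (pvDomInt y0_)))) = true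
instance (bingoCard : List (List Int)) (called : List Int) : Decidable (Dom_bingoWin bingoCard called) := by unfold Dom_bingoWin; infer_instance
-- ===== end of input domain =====

-- B replaces A's two separate quadratic passes (each scanning `called` per cell) with ONE pass over
-- the card accumulating per-row and per-column hit counts in two arrays, with a set for membership.

-- ===== PORT A =====
-- bingoCard[i][j]: indexing a cell (none = IndexError; excluded by Pre_ below)
def pvCell (bingoCard : List (List Int)) (i j : Int) : Option Int :=
  (PySem.List.pyGet? bingoCard i).bind fun row => PySem.List.pyGet? row j

def bingoWin (bingoCard : List (List Int)) (called : List Int) : Bool :=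
  -- Check Rows: for i in range(len(bingoCard)): nums = 0; for j …: if bingoCard[i][j] in called: nums += 1; if nums >= 5: return True
  ((PySem.List.pyRange 0 (bingoCard.length : Int) 1).any fun i =>
    decide (5 ≤ (PySem.List.pyRange 0 (bingoCard.length : Int) 1).foldl (fun nums j =>
      if (pvCell bingoCard i j).any (fun v => called.contains v) then nums + 1 else nums) (0 : Int)))
  ||
  -- Check Cols
  ((PySem.List.pyRange 0 (bingoCard.length : Int) 1).any fun i =>
    decide (5 ≤ (PySem.List.pyRange 0 (bingoCard.length : Int) 1).foldl (fun nums j =>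
      if (pvCell bingoCard j i).any (fun v => called.contains v) then nums + 1 else nums) (0 : Int)))

-- ===== PORT B =====
def bingoWin_alt (bingoCard : List (List Int)) (called : List Int) : Bool :=
  -- one pass: rowCount[i] += 1 and colCount[j] += 1 whenever bingoCard[i][j] in calledSet
  let counts := (List.range bingoCard.length).foldl (fun st (i : Nat) =>
      (List.range bingoCard.length).foldl (fun (st : List Int × List Int) (j : Nat) =>
          if (pvCell bingoCard (i : Int) (j : Int)).any
               (fun v => PySem.Set.contains (PySem.Set.ofList called) v) then
            (st.1.modify i (· + 1), st.2.modify j (· + 1))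
          else st) st)
    (List.replicate bingoCard.length (0 : Int), List.replicate bingoCard.length (0 : Int))
  counts.1.any (fun c => decide (5 ≤ c)) || counts.2.any (fun c => decide (5 ≤ c))

-- ===== PRECONDITION & SPEC =====
-- Pre_ excludes ragged cards with a row shorter than the card's height, on which the Python A
-- raises IndexError (B raises there too).
def Pre_bingoWin (bingoCard : List (List Int)) (called : List Int) : Prop :=
  ∀ row ∈ bingoCard, bingoCard.length ≤ row.length
instance (bingoCard : List (List Int)) (called : List Int) : Decidable (Pre_bingoWin bingoCard called) := by
  unfold Pre_bingoWin; infer_instance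

def pvWitness_bingoWin : List (List Int) × List Int :=
  ([[1,2,3,4,5],[6,7,8,9,10],[11,12,13,14,15],[16,17,18,19,20],[21,22,23,24,25]], [1,2,3,4,5,11])

def Spec_bingoWin (bingoCard : List (List Int)) (called : List Int) (out : Bool) : Prop := out = bingoWin_alt bingoCard called
instance (bingoCard : List (List Int)) (called : List Int) (out : Bool) : Decidable (Spec_bingoWin bingoCard called out) := by unfold Spec_bingoWin; infer_instance

-- ===== CLAIM (what is proved, stated in full; the proofs are below) =====
def Claim_equal_bingoWin : Prop := ∀ (bingoCard : List (List Int)) (called : List Int), Dom_bingoWin bingoCard called → Pre_bingoWin bingoCard called → Spec_bingoWin bingoCard called (bingoWin bingoCard called)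

-- ===== LEMMAS AND PROOFS =====

-- the membership test both programs make on cell (i, j)
def pvHit (bingoCard : List (List Int)) (called : List Int) (i j : Nat) : Bool :=
  (pvCell bingoCard (i : Int) (j : Int)).any (fun v => called.contains v)

theorem pvSetContains (called : List Int) (v : Int) :
    PySem.Set.contains (PySem.Set.ofList called) v = called.contains v := by
  simp only [PySem.Set.contains]
  rw [Bool.eq_iff_iff]
  simp [PySem.Set.mem_ofList]

-- a fold of conditional bumps, read back through getElem?
theorem pvBump (q : Nat × Nat → Bool) (ix : Nat × Nat → Nat) (l : List (Nat × Nat))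
    (r : List Int) (k : Nat) :
    (l.foldl (fun r x => if q x then r.modify (ix x) (· + 1) else r) r)[k]? =
      r[k]?.map (· + (l.countP (fun x => q x && ix x == k) : Int)) := by
  induction l generalizing r with
  | nil => cases h : r[k]? <;> simp [h]
  | cons x xs ih =>
    simp only [List.foldl_cons, List.countP_cons]
    by_cases hq : q x
    · rw [if_pos hq, ih, List.getElem?_modify]
      by_cases hik : ix x = k
      · cases h : r[k]? <;> simp [hq, hik] <;> push_cast <;> ring
      · have hb : (ix x == k) = false := by simp [hik]
        cases h : r[k]? <;> simp [hq, hik, hb]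
    · have hb : (q x && ix x == k) = false := by simp [hq]
      rw [if_neg hq, ih, hb]
      simp

-- sum of a map over range n that is zero except at k < n
theorem pvSumIte (n k : Nat) (f : Nat → Nat) (hk : k < n) :
    (((List.range n).map (fun i => if i = k then f i else 0)).sum = f k) := by
  induction n with
  | zero => omega
  | succ m ih =>
    rw [List.range_succ, List.map_append, List.sum_append]
    by_cases h : k = m
    · subst h
      have hz : (((List.range k).map (fun i => if i = k then f i else 0)).sum = 0) := by
        apply List.sum_eq_zero
        intro x hx
        simp only [List.mem_map, List.mem_range] at hx
        obtain ⟨i, hi, rfl⟩ := hx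
        simp [Nat.ne_of_lt hi]
      simp [hz]
    · have hk' : k < m := by omega
      have hne : m ≠ k := fun hh => h hh.symm
      simp [ih hk', hne]

-- counting j = k inside range n collapses to the single test at k
theorem pvCountSingle (n k : Nat) (p : Nat → Bool) (hk : k < n) :
    (List.range n).countP (fun j => p j && (j == k)) = if p k then 1 else 0 := by
  induction n with
  | zero => omega
  | succ m ih =>
    rw [List.range_succ, List.countP_append]
    by_cases h : k = m
    · subst h
      have hz : (List.range k).countP (fun j => p j && (j == k)) = 0 := by
        apply List.countP_eq_zero.2
        intro j hj
        simp only [List.mem_range] at hj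
        simp [Nat.ne_of_lt hj]
      simp [hz]
    · have hk' : k < m := by omega
      rw [ih hk']
      have hb : (m == k) = false := by simp [Ne.symm h]
      simp [hb]

-- Nat version of "a 0/1 sum is a count"
theorem pvSum01 (p : Nat → Bool) (l : List Nat) :
    ((l.map (fun i => if p i then 1 else 0)).sum = l.countP p) := by
  induction l with
  | nil => simp
  | cons x xs ih => cases h : p x <;> simp [h, ih] <;> omega

-- the index-pair list B's single pass walks
def pvPairs (n : Nat) : List (Nat × Nat) :=
  (List.range n).flatMap (fun i => (List.range n).map (fun j => (i, j)))

theorem pvRowCnt (n k : Nat) (q : Nat → Nat → Bool) (hk : k < n) :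
    (pvPairs n).countP (fun x => q x.1 x.2 && x.1 == k) =
      (List.range n).countP (fun j => q k j) := by
  unfold pvPairs
  rw [List.countP_flatMap]
  have hmap : ((List.range n).map
      (List.countP (fun x => q x.1 x.2 && x.1 == k) ∘ fun i => (List.range n).map fun j => (i, j)))
      = (List.range n).map (fun i => if i = k then (List.range n).countP (fun j => q k j) else 0) := by
    apply List.map_congr_left
    intro i _
    simp only [Function.comp_def, List.countP_map]
    by_cases h : i = k
    · subst h; simp
    · have hb : (i == k) = false := by simp [h]
      simp [hb, h]
  rw [hmap, pvSumIte _ _ _ hk]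

theorem pvColCnt (n k : Nat) (q : Nat → Nat → Bool) (hk : k < n) :
    (pvPairs n).countP (fun x => q x.1 x.2 && x.2 == k) =
      (List.range n).countP (fun i => q i k) := by
  unfold pvPairs
  rw [List.countP_flatMap]
  have hmap : ((List.range n).map
      (List.countP (fun x => q x.1 x.2 && x.2 == k) ∘ fun i => (List.range n).map fun j => (i, j)))
      = (List.range n).map (fun i => if q i k then 1 else 0) := by
    apply List.map_congr_left
    intro i _
    simp only [Function.comp_def, List.countP_map]
    exact pvCountSingle n k (fun j => q i j) hk
  rw [hmap, pvSum01]

-- A's value in a common normal form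
theorem pvA_eq (bingoCard : List (List Int)) (called : List Int) :
    bingoWin bingoCard called =
      (((List.range bingoCard.length).any fun i =>
          decide (5 ≤ ((List.range bingoCard.length).countP (fun j => pvHit bingoCard called i j) : Int)))
       ||
       ((List.range bingoCard.length).any fun i =>
          decide (5 ≤ ((List.range bingoCard.length).countP (fun j => pvHit bingoCard called j i) : Int)))) := by
  unfold bingoWin
  rw [PySem.List.pyRange_one]
  simp [List.any_map, List.foldl_map, PySem.List.foldl_count_if, pvHit, Function.comp_def]

-- B's value in the same normal form
theorem pvB_eq (bingoCard : List (List Int)) (called : List Int) :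
    bingoWin_alt bingoCard called =
      (((List.range bingoCard.length).any fun i =>
          decide (5 ≤ ((List.range bingoCard.length).countP (fun j => pvHit bingoCard called i j) : Int)))
       ||
       ((List.range bingoCard.length).any fun i =>
          decide (5 ≤ ((List.range bingoCard.length).countP (fun j => pvHit bingoCard called j i) : Int)))) := by
  have h0 : bingoWin_alt bingoCard called =
      (((List.range bingoCard.length).foldl (fun st (i : Nat) =>
          (List.range bingoCard.length).foldl (fun (st : List Int × List Int) (j : Nat) =>
              if (pvCell bingoCard (i : Int) (j : Int)).any
                   (fun v => PySem.Set.contains (PySem.Set.ofList called) v) then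
                (st.1.modify i (· + 1), st.2.modify j (· + 1))
              else st) st)
        (List.replicate bingoCard.length (0 : Int), List.replicate bingoCard.length (0 : Int))).1.any
          (fun c => decide (5 ≤ c))
       ||
       ((List.range bingoCard.length).foldl (fun st (i : Nat) =>
          (List.range bingoCard.length).foldl (fun (st : List Int × List Int) (j : Nat) =>
              if (pvCell bingoCard (i : Int) (j : Int)).any
                   (fun v => PySem.Set.contains (PySem.Set.ofList called) v) then
                (st.1.modify i (· + 1), st.2.modify j (· + 1))
              else st) st)
        (List.replicate bingoCard.length (0 : Int), List.replicate bingoCard.length (0 : Int))).2.any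
          (fun c => decide (5 ≤ c))) := rfl
  rw [h0]
  simp only [pvSetContains]
  have key : ((List.range bingoCard.length).foldl (fun st (i : Nat) =>
          (List.range bingoCard.length).foldl (fun (st : List Int × List Int) (j : Nat) =>
              if (pvCell bingoCard (i : Int) (j : Int)).any (fun v => called.contains v) then
                (st.1.modify i (· + 1), st.2.modify j (· + 1))
              else st) st)
        (List.replicate bingoCard.length (0 : Int), List.replicate bingoCard.length (0 : Int)))
      = ((pvPairs bingoCard.length).foldl
           (fun r x => if pvHit bingoCard called x.1 x.2 then r.modify x.1 (· + 1) else r)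
           (List.replicate bingoCard.length (0 : Int)),
         (pvPairs bingoCard.length).foldl
           (fun c x => if pvHit bingoCard called x.1 x.2 then c.modify x.2 (· + 1) else c)
           (List.replicate bingoCard.length (0 : Int))) := by
    rw [← PySem.List.foldl_prod_mk]
    unfold pvPairs
    rw [List.foldl_flatMap]
    congr 1
    funext st i
    rw [List.foldl_map]
    congr 1
    funext st' j
    simp only [pvHit]
    split_ifs <;> rfl
  rw [key]
  have hrow : (pvPairs bingoCard.length).foldl
      (fun r x => if pvHit bingoCard called x.1 x.2 then r.modify x.1 (· + 1) else r)
      (List.replicate bingoCard.length (0 : Int))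
      = (List.range bingoCard.length).map (fun k =>
          (((List.range bingoCard.length).countP (fun j => pvHit bingoCard called k j)) : Int)) := by
    apply List.ext_getElem?
    intro k
    rw [pvBump (fun x => pvHit bingoCard called x.1 x.2) (fun x => x.1)]
    by_cases hk : k < bingoCard.length
    · rw [List.getElem?_replicate]
      simp only [hk, if_pos, Option.map_some]
      rw [pvRowCnt _ _ _ hk]
      simp [hk]
    · rw [List.getElem?_replicate]
      simp [hk]
  have hcol : (pvPairs bingoCard.length).foldl
      (fun c x => if pvHit bingoCard called x.1 x.2 then c.modify x.2 (· + 1) else c)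
      (List.replicate bingoCard.length (0 : Int))
      = (List.range bingoCard.length).map (fun k =>
          (((List.range bingoCard.length).countP (fun i => pvHit bingoCard called i k)) : Int)) := by
    apply List.ext_getElem?
    intro k
    rw [pvBump (fun x => pvHit bingoCard called x.1 x.2) (fun x => x.2)]
    by_cases hk : k < bingoCard.length
    · rw [List.getElem?_replicate]
      simp only [hk, if_pos, Option.map_some]
      rw [pvColCnt _ _ _ hk]
      simp [hk]
    · rw [List.getElem?_replicate]
      simp [hk]
  rw [hrow, hcol]
  simp [List.any_map, Function.comp_def]

-- ===== VERDICT (by name: the statement is the Claim_ definition above) =====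
theorem bingoWin_spec : Claim_equal_bingoWin := by
  intro bingoCard called _hdom _hpre
  unfold Spec_bingoWin
  rw [pvA_eq, pvB_eq]
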